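-- pv_equiv track=rewrite | github.com/taruns900/Defect_Detection_Project | Radon_Learnings/eg1.py | complicated
-- ===== SOURCE A (Python) =====
-- def complicated(n):
--     total = 0
--     for i in range(n):
--         if i % 2 == 0:
--             total += i
--         else:
--             if i % 3 == 0:
--                 total -= i
--             else:
--                 total += 2 * i
--     return total
-- ===== SOURCE B (Python) =====
-- def _prefix(r):
--     # prefix sums over one residue block of weights [1, 2, 1, -1, 1, 2]:
--     # W = sum of the first r weights, S = sum of weight*offset for offsets < r
--     if r == 0:
--         return (0, 0)
--     if r == 1:
--         return (1, 0)
--     if r == 2: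
--         return (3, 2)
--     if r == 3:
--         return (4, 4)
--     if r == 4:
--         return (3, 1)
--     return (4, 5)
--
--
-- def complicated(n):
--     # closed form: each full block of 6 indices starting at 6k contributes 36k + 15
--     if n <= 0:
--         return 0
--     q, r = divmod(n, 6)
--     W, S = _prefix(r)
--     return 18 * q * q - 3 * q + 6 * q * W + S
-- ===== Notes on version B (the rewrite author's own statement) =====
-- stated objective: faster
-- what changed: Replaces the O(n) loop over range(n) by an O(1) closed form: full blocks of 6 indices contribute 36k+15 each (summed as 18q^2-3q) plus a precomputed prefix table for the partial block.
import Mathlib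
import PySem

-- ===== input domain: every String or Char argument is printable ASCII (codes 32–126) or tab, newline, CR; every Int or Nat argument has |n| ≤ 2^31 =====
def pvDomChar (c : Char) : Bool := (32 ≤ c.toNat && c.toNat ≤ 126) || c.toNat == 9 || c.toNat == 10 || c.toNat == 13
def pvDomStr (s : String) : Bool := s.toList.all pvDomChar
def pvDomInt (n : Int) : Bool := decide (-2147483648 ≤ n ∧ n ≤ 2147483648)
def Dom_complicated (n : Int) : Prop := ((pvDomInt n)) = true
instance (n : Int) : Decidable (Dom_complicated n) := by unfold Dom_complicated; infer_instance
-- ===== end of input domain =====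

-- B replaces A's O(n) loop by an O(1) closed form (blocks of 6 + prefix table); equivalence proved for all n.

-- ===== PORT A =====
def complicated (n : Int) : Int :=
  (PySem.List.pyRange 0 n 1).foldl
    (fun total i =>
      if PySem.Int.mod i 2 = 0 then total + i
      else if PySem.Int.mod i 3 = 0 then total - i
      else total + 2 * i) 0

-- ===== PORT B =====
def prefixWS (r : Int) : Int × Int :=
  if r = 0 then (0, 0)
  else if r = 1 then (1, 0)
  else if r = 2 then (3, 2)
  else if r = 3 then (4, 4)
  else if r = 4 then (3, 1)
  else (4, 5)

def complicated_alt (n : Int) : Int :=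
  if n ≤ 0 then 0
  else
    let q := PySem.Int.floordiv n 6
    let r := PySem.Int.mod n 6
    let WS := prefixWS r
    18 * q * q - 3 * q + 6 * q * WS.1 + WS.2

-- ===== PRECONDITION & SPEC =====
def Spec_complicated (n : Int) (out : Int) : Prop := out = complicated_alt n
instance (n : Int) (out : Int) : Decidable (Spec_complicated n out) := by unfold Spec_complicated; infer_instance

-- ===== CLAIM (what is proved, stated in full; the proofs are below) =====
def Claim_equal_complicated : Prop := ∀ (n : Int), Dom_complicated n → Spec_complicated n (complicated n)

-- ===== LEMMAS AND PROOFS =====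

theorem complicated_nonpos (n : Int) (h : n ≤ 0) : complicated n = 0 := by
  unfold complicated
  have h0 : n.toNat = 0 := by omega
  simp [PySem.List.pyRange_one, h0]

theorem alt_nonneg (x : Int) (hx : 0 ≤ x) :
    complicated_alt x =
      18 * (x / 6) * (x / 6) - 3 * (x / 6) + 6 * (x / 6) * (prefixWS (x % 6)).1 + (prefixWS (x % 6)).2 := by
  unfold complicated_alt
  rw [PySem.Int.floordiv_eq_ediv_of_pos (by norm_num : (0:Int) < 6),
      PySem.Int.mod_eq_emod_of_pos (by norm_num : (0:Int) < 6)]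
  split_ifs with h0
  · have hx0 : x = 0 := le_antisymm h0 hx
    subst hx0
    decide
  · rfl

theorem alt_step (m : Nat) :
    complicated_alt ((m : Int) + 1) =
      (if PySem.Int.mod (m : Int) 2 = 0 then complicated_alt (m : Int) + (m : Int)
       else if PySem.Int.mod (m : Int) 3 = 0 then complicated_alt (m : Int) - (m : Int)
       else complicated_alt (m : Int) + 2 * (m : Int)) := by
  have hm : (0:Int) ≤ (m : Int) := Int.natCast_nonneg m
  rw [PySem.Int.mod_eq_emod_of_pos (by norm_num : (0:Int) < 2),
      PySem.Int.mod_eq_emod_of_pos (by norm_num : (0:Int) < 3),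
      alt_nonneg ((m : Int) + 1) (by omega), alt_nonneg (m : Int) hm]
  have hr6 : (m : Int) % 6 = 0 ∨ (m : Int) % 6 = 1 ∨ (m : Int) % 6 = 2 ∨ (m : Int) % 6 = 3 ∨
      (m : Int) % 6 = 4 ∨ (m : Int) % 6 = 5 := by omega
  have hdm : (m : Int) / 6 * 6 + (m : Int) % 6 = (m : Int) := by omega
  rcases hr6 with h | h | h | h | h | h <;>
    [ (have hq : ((m : Int) + 1) / 6 = (m : Int) / 6 := by omega
       have hr : ((m : Int) + 1) % 6 = 1 := by omega
       have h2 : (m : Int) % 2 = 0 := by omega);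
      (have hq : ((m : Int) + 1) / 6 = (m : Int) / 6 := by omega
       have hr : ((m : Int) + 1) % 6 = 2 := by omega
       have h2 : (m : Int) % 2 = 1 := by omega
       have h3 : (m : Int) % 3 = 1 := by omega);
      (have hq : ((m : Int) + 1) / 6 = (m : Int) / 6 := by omega
       have hr : ((m : Int) + 1) % 6 = 3 := by omega
       have h2 : (m : Int) % 2 = 0 := by omega);
      (have hq : ((m : Int) + 1) / 6 = (m : Int) / 6 := by omega
       have hr : ((m : Int) + 1) % 6 = 4 := by omega
       have h2 : (m : Int) % 2 = 1 := by omega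
       have h3 : (m : Int) % 3 = 0 := by omega);
      (have hq : ((m : Int) + 1) / 6 = (m : Int) / 6 := by omega
       have hr : ((m : Int) + 1) % 6 = 5 := by omega
       have h2 : (m : Int) % 2 = 0 := by omega);
      (have hq : ((m : Int) + 1) / 6 = (m : Int) / 6 + 1 := by omega
       have hr : ((m : Int) + 1) % 6 = 0 := by omega
       have h2 : (m : Int) % 2 = 1 := by omega
       have h3 : (m : Int) % 3 = 2 := by omega)] <;>
    rw [hq, hr, h] <;>
    norm_num [prefixWS] <;>
    split_ifs <;>
    first
      | (exfalso ; omega)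
      | nlinarith [hdm]

theorem ab_eq_nat (m : Nat) : complicated (m : Int) = complicated_alt (m : Int) := by
  induction m with
  | zero => decide
  | succ k ih =>
    have hpeel : PySem.List.pyRange 0 ((k : Int) + 1) 1 =
        PySem.List.pyRange 0 (k : Int) 1 ++ [(k : Int)] := by
      rw [PySem.List.pyRange_one, PySem.List.pyRange_one]
      have h1 : ((k : Int) + 1 - 0).toNat = k + 1 := by omega
      have h2 : ((k : Int) - 0).toNat = k := by omega
      rw [h1, h2, List.range_succ]
      simp
    have : complicated ((k : Int) + 1) =
        (if PySem.Int.mod (k : Int) 2 = 0 then complicated (k : Int) + (k : Int)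
         else if PySem.Int.mod (k : Int) 3 = 0 then complicated (k : Int) - (k : Int)
         else complicated (k : Int) + 2 * (k : Int)) := by
      unfold complicated
      rw [hpeel, List.foldl_append]
      simp only [List.foldl]
    push_cast
    rw [this, alt_step k, ih]

-- ===== VERDICT (by name: the statement is the Claim_ definition above) =====
theorem complicated_spec : Claim_equal_complicated := by
  intro n _
  unfold Spec_complicated
  by_cases h : n ≤ 0
  · rw [complicated_nonpos n h]
    unfold complicated_alt
    simp [h]
  · push Not at h
    obtain ⟨m, rfl⟩ : ∃ m : Nat, n = (m : Int) := ⟨n.toNat, by omega⟩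
    exact ab_eq_nat m
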